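-- pv_equiv track=rewrite | github.com/yeonwook1993/algorithm_study | math/1476.py | calDate
-- ===== SOURCE A (Python) =====
-- def calDate(e, s, m, answer = 1):
--     if(e%15 == 0) : e = 0
--     if(s%28 == 0) : s = 0
--     if(m%19 == 0) : m = 0
--     while 1:
--         if(answer%15 == e) :
--             if(answer%28 == s) :
--                 if(answer%19 == m) :
--                     break
--                 else :
--                     answer = answer + 1
--             else :
--                 answer = answer + 1
--         else :
--             answer = answer + 1
--     return answer
-- ===== SOURCE B (Python) =====
-- def calDate(e, s, m, answer = 1):
--     # CRT closed form: moduli 15, 28, 19, product 7980.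
--     # 6916 = 28*19*13 (13 = inverse of 532 mod 15), 4845 = 15*19*17, 4200 = 15*28*10.
--     x0 = (6916 * e + 4845 * s + 4200 * m) % 7980
--     return answer + (x0 - answer) % 7980
-- ===== Notes on version B (the rewrite author's own statement) =====
-- stated objective: alternative
-- what changed: Replaces the unbounded linear scan over candidate years with a closed-form Chinese Remainder Theorem formula (precomputed partial products and modular inverses mod 15/28/19) plus one mod to shift the unique residue class to the first value >= answer.
-- outside the precondition, e.g. on calDate(20, 0, 0, 1): A does not finish within the time limit, B returns 2660
import Mathlib
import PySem

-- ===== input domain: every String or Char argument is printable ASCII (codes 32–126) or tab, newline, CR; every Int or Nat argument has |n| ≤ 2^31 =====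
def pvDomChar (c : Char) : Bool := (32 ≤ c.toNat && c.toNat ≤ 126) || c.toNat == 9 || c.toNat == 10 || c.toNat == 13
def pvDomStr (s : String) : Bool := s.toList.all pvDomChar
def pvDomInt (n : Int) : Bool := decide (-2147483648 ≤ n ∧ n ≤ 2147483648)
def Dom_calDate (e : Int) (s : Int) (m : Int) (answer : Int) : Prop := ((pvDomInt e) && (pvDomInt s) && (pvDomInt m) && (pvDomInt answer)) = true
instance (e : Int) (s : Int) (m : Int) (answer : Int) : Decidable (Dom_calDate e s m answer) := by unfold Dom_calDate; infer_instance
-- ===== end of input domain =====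

-- B replaces A's unbounded linear year scan with a closed-form CRT formula (objective: alternative).

-- ===== PORT A =====
-- A's `while 1` loop: ported with fuel 7980; on every input admitted by Pre_calDate the loop
-- terminates within 7980 steps (the congruence classes repeat with period 15*28*19 = 7980),
-- so the fuel is never exhausted there and the port is exact on Pre_.
def calDateLoop (e : Int) (s : Int) (m : Int) : Nat → Int → Int
  | 0, answer => answer
  | Nat.succ k, answer =>
    if PySem.Int.mod answer 15 = e then
      if PySem.Int.mod answer 28 = s then
        if PySem.Int.mod answer 19 = m then answer
        else calDateLoop e s m k (answer + 1)
      else calDateLoop e s m k (answer + 1)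
    else calDateLoop e s m k (answer + 1)

def calDate (e : Int) (s : Int) (m : Int) (answer : Int) : Int :=
  calDateLoop
    (if PySem.Int.mod e 15 = 0 then 0 else e)
    (if PySem.Int.mod s 28 = 0 then 0 else s)
    (if PySem.Int.mod m 19 = 0 then 0 else m)
    7980 answer

-- ===== PORT B =====
-- 6916 = 28*19*13, 4845 = 15*19*17, 4200 = 15*28*10 (CRT weights for moduli 15, 28, 19).
def calDate_alt (e : Int) (s : Int) (m : Int) (answer : Int) : Int :=
  let x0 := PySem.Int.mod (6916 * e + 4845 * s + 4200 * m) 7980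
  answer + PySem.Int.mod (x0 - answer) 7980

-- ===== PRECONDITION & SPEC =====
-- Pre_ excludes exactly the inputs on which A's `while 1` loop never terminates: after A's
-- normalization each remainder must lie in the range of the corresponding modulus, i.e. each of
-- e, s, m is either a multiple of its modulus or already in [0, modulus).
def Pre_calDate (e : Int) (s : Int) (m : Int) (answer : Int) : Prop :=
  (e % 15 = 0 ∨ (0 ≤ e ∧ e < 15)) ∧ (s % 28 = 0 ∨ (0 ≤ s ∧ s < 28)) ∧ (m % 19 = 0 ∨ (0 ≤ m ∧ m < 19))
instance (e : Int) (s : Int) (m : Int) (answer : Int) : Decidable (Pre_calDate e s m answer) := by unfold Pre_calDate; infer_instance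

def pvWitness_calDate : Int × Int × Int × Int := (1, 2, 3, 1)

def Spec_calDate (e : Int) (s : Int) (m : Int) (answer : Int) (out : Int) : Prop := out = calDate_alt e s m answer
instance (e : Int) (s : Int) (m : Int) (answer : Int) (out : Int) : Decidable (Spec_calDate e s m answer out) := by unfold Spec_calDate; infer_instance

-- ===== CLAIM (what is proved, stated in full; the proofs are below) =====
def Claim_equal_calDate : Prop := ∀ (e : Int) (s : Int) (m : Int) (answer : Int), Dom_calDate e s m answer → Pre_calDate e s m answer → Spec_calDate e s m answer (calDate e s m answer)

-- ===== LEMMAS AND PROOFS =====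

-- PySem mod with a positive literal divisor is Lean's emod.
theorem pvMod (a b : Int) (h : 0 < b) : PySem.Int.mod a b = a % b :=
  PySem.Int.mod_eq_emod_of_pos h

-- CRT for the moduli 15, 28, 19: the three congruences are one congruence mod 7980.
theorem pvCrt (e s m e' s' m' n : Int) (he : e' = e % 15) (hs : s' = s % 28) (hm : m' = m % 19) :
    ((n % 15 = e' ∧ n % 28 = s' ∧ n % 19 = m') ↔
      n % 7980 = (6916 * e + 4845 * s + 4200 * m) % 7980) := by
  omega

-- If t is the first value ≥ a satisfying the three congruences, the fueled scan from a returns t.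
theorem pvLoopSpec (e s m t : Int)
    (ht : PySem.Int.mod t 15 = e ∧ PySem.Int.mod t 28 = s ∧ PySem.Int.mod t 19 = m) :
    ∀ (k : Nat) (a : Int), a ≤ t → (t - a).toNat ≤ k →
      (∀ n, a ≤ n → n < t →
        ¬(PySem.Int.mod n 15 = e ∧ PySem.Int.mod n 28 = s ∧ PySem.Int.mod n 19 = m)) →
      calDateLoop e s m k a = t := by
  intro k
  induction k with
  | zero =>
    intro a h1 h2 _
    have : a = t := by omega
    subst this
    rfl
  | succ k ih =>
    intro a h1 h2 hgap
    by_cases hsat : (PySem.Int.mod a 15 = e ∧ PySem.Int.mod a 28 = s ∧ PySem.Int.mod a 19 = m)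
    · have hat : a = t := by
        rcases eq_or_lt_of_le h1 with h | h
        · exact h
        · exact absurd hsat (hgap a le_rfl h)
      subst hat
      simp only [calDateLoop, if_pos hsat.1, if_pos hsat.2.1, if_pos hsat.2.2]
    · have hlt : a < t := by
        rcases eq_or_lt_of_le h1 with h | h
        · subst h; exact absurd ht hsat
        · exact h
      have step : calDateLoop e s m (k + 1) a = calDateLoop e s m k (a + 1) := by
        simp only [calDateLoop]
        split_ifs with h1' h2' h3'
        · exact absurd ⟨h1', h2', h3'⟩ hsat
        · rfl
        · rfl
        · rfl
      rw [step]
      exact ih (a + 1) (by omega) (by omega) (fun n hn1 hn2 => hgap n (by omega) hn2)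

-- ===== VERDICT (by name: the statement is the Claim_ definition above) =====
theorem calDate_spec : Claim_equal_calDate := by
  intro e s m answer _ hPre
  obtain ⟨hE, hS, hM⟩ := hPre
  unfold Spec_calDate calDate calDate_alt
  have he' : (if PySem.Int.mod e 15 = 0 then 0 else e) = e % 15 := by
    rw [pvMod e 15 (by norm_num)]; split_ifs with h <;> omega
  have hs' : (if PySem.Int.mod s 28 = 0 then 0 else s) = s % 28 := by
    rw [pvMod s 28 (by norm_num)]; split_ifs with h <;> omega
  have hm' : (if PySem.Int.mod m 19 = 0 then 0 else m) = m % 19 := by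
    rw [pvMod m 19 (by norm_num)]; split_ifs with h <;> omega
  rw [he', hs', hm']
  simp only [pvMod _ 7980 (by norm_num : (0:Int) < 7980)]
  set x0 : Int := (6916 * e + 4845 * s + 4200 * m) % 7980 with hx0
  set t : Int := answer + (x0 - answer) % 7980 with ht
  refine pvLoopSpec (e % 15) (s % 28) (m % 19) t ?_ 7980 answer (by omega) (by omega) ?_
  · have h7980 : t % 7980 = (6916 * e + 4845 * s + 4200 * m) % 7980 := by omega
    have := (pvCrt e s m (e % 15) (s % 28) (m % 19) t rfl rfl rfl).mpr h7980
    refine ⟨?_, ?_, ?_⟩ <;>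
      [rw [pvMod t 15 (by norm_num)]; rw [pvMod t 28 (by norm_num)]; rw [pvMod t 19 (by norm_num)]] <;>
      [exact this.1; exact this.2.1; exact this.2.2]
  · intro n hn1 hn2 hsatn
    rw [pvMod n 15 (by norm_num), pvMod n 28 (by norm_num), pvMod n 19 (by norm_num)] at hsatn
    have := (pvCrt e s m (e % 15) (s % 28) (m % 19) n rfl rfl rfl).mp hsatn
    omega
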